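-- pv_equiv track=rewrite | github.com/crzwdjk/gtfstools | timetable.py | route_key
-- ===== SOURCE A (Python) =====
-- def route_key(rt):
--     # find the int part
--     r = rt[1]
--     s = 0
--     while s < len(r) and (r[s] < '0' or r[s] > '9'):
--         s += 1
--     e = s
--     while e < len(r) and (r[e] >= '0' and r[e] <= '9'):
--         e += 1
--     intpart = int(r[s:e]) if s != e else 0
--     return (r[0:s], intpart, r[e:])
-- ===== SOURCE B (Python) =====
-- def route_key(rt):
--     pre, num, suf = [], [], []
--     state = 0
--     for c in rt[1]:
--         if state == 0:
--             if '0' <= c <= '9':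
--                 state = 1
--                 num.append(c)
--             else:
--                 pre.append(c)
--         elif state == 1:
--             if '0' <= c <= '9':
--                 num.append(c)
--             else:
--                 state = 2
--                 suf.append(c)
--         else:
--             suf.append(c)
--     return (''.join(pre), int(''.join(num)) if num else 0, ''.join(suf))
-- ===== Notes on version B (the rewrite author's own statement) =====
-- stated objective: alternative
-- what changed: a single-pass three-state machine (fold over the characters accumulating prefix/digits/suffix) replaces A's two index-scanning while loops plus slicing
import Mathlib
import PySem

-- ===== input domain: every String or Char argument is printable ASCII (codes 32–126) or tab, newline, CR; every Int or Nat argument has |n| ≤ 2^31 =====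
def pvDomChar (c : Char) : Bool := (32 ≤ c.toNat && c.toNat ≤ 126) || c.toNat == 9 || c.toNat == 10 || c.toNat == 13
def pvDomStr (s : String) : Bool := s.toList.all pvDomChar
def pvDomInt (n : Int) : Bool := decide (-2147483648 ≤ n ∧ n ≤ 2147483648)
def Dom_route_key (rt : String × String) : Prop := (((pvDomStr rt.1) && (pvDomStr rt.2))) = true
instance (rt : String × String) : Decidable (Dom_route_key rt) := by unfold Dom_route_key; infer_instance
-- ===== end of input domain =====

-- B replaces A's two index-scanning while loops plus slicing by a single-pass three-state machine (alternative decomposition, same cost).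

-- ===== PORT A =====
-- while s < len(r) and (r[s] < '0' or r[s] > '9'): s += 1
def rkFindS (r : List Char) (s : Nat) : Nat :=
  if h : s < r.length then
    if r[s] < '0' ∨ '9' < r[s] then rkFindS r (s + 1) else s
  else s
termination_by r.length - s

-- while e < len(r) and (r[e] >= '0' and r[e] <= '9'): e += 1
def rkFindE (r : List Char) (e : Nat) : Nat :=
  if h : e < r.length then
    if '0' ≤ r[e] ∧ r[e] ≤ '9' then rkFindE r (e + 1) else e
  else e
termination_by r.length - e

-- slices r[0:s], r[s:e], r[e:] with 0 ≤ s ≤ e ≤ len(r) are exactly take/drop here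
def route_key (rt : String × String) : String × Int × String :=
  let r := rt.2.toList
  let s := rkFindS r 0
  let e := rkFindE r s
  let intpart : Int :=
    if s ≠ e then (PySem.Int.ofStr? (String.mk ((r.drop s).take (e - s)))).getD 0 else 0
  (String.mk (r.take s), intpart, String.mk (r.drop e))

-- ===== PORT B =====
-- one step of the for-loop's state machine: state 0 = in prefix, 1 = in digit run, 2 = in suffix
def rkStep (st : Nat × List Char × List Char × List Char) (c : Char) :
    Nat × List Char × List Char × List Char :=
  match st with
  | (state, pre, num, suf) =>
    if state = 0 then
      if '0' ≤ c ∧ c ≤ '9' then (1, pre, num ++ [c], suf) else (0, pre ++ [c], num, suf)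
    else if state = 1 then
      if '0' ≤ c ∧ c ≤ '9' then (1, pre, num ++ [c], suf) else (2, pre, num, suf ++ [c])
    else (state, pre, num, suf ++ [c])

def route_key_alt (rt : String × String) : String × Int × String :=
  let out := rt.2.toList.foldl rkStep (0, [], [], [])
  (String.mk out.2.1,
   if out.2.2.1 ≠ [] then (PySem.Int.ofStr? (String.mk out.2.2.1)).getD 0 else 0,
   String.mk out.2.2.2)

-- ===== PRECONDITION & SPEC =====
def Spec_route_key (rt : String × String) (out : String × Int × String) : Prop := out = route_key_alt rt
instance (rt : String × String) (out : String × Int × String) : Decidable (Spec_route_key rt out) := by unfold Spec_route_key; infer_instance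

-- ===== CLAIM =====
def Claim_equal_route_key : Prop := ∀ (rt : String × String), Dom_route_key rt → Spec_route_key rt (route_key rt)

-- ===== LEMMAS AND PROOFS =====
-- digit / non-digit tests shared by both ports, as Bool predicates for takeWhile/dropWhile
def rkDg (c : Char) : Bool := decide ('0' ≤ c ∧ c ≤ '9')
def rkNd (c : Char) : Bool := !rkDg c

lemma rkFold2 (l : List Char) (p n s : List Char) :
    l.foldl rkStep (2, p, n, s) = (2, p, n, s ++ l) := by
  induction l generalizing s with
  | nil => simp
  | cons c t ih => simp [rkStep, ih]

lemma rkFold1 (l : List Char) (p n s : List Char) :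
    l.foldl rkStep (1, p, n, s) =
      (if l.dropWhile rkDg = [] then 1 else 2, p, n ++ l.takeWhile rkDg, s ++ l.dropWhile rkDg) := by
  induction l generalizing n s with
  | nil => simp
  | cons c t ih =>
    by_cases h : '0' ≤ c ∧ c ≤ '9'
    · have hd : rkDg c = true := by simp [rkDg, h]
      simp [rkStep, h, hd, List.takeWhile_cons, List.dropWhile_cons, ih]
    · have hd : rkDg c = false := by simp [rkDg, h]
      simp [rkStep, h, hd, List.dropWhile_cons, rkFold2]

lemma rkFold0 (l : List Char) (p n s : List Char) :
    l.foldl rkStep (0, p, n, s) =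
      if l.dropWhile rkNd = [] then (0, p ++ l, n, s)
      else (l.dropWhile rkNd).foldl rkStep (1, p ++ l.takeWhile rkNd, n, s) := by
  induction l generalizing p with
  | nil => simp
  | cons c t ih =>
    by_cases h : '0' ≤ c ∧ c ≤ '9'
    · have hd : rkNd c = false := by simp [rkNd, rkDg, h]
      simp [rkStep, h, hd, List.takeWhile_cons, List.dropWhile_cons]
    · have hd : rkNd c = true := by simp [rkNd, rkDg, h]
      simp [rkStep, h, hd, List.takeWhile_cons, List.dropWhile_cons, ih]

lemma rkFindS_spec (r : List Char) (s : Nat) :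
    rkFindS r s = s + ((r.drop s).takeWhile rkNd).length := by
  refine rkFindS.induct r (fun s => rkFindS r s = s + ((r.drop s).takeWhile rkNd).length)
    ?_ ?_ ?_ s
  · intro x h hc ih
    have hdrop : r.drop x = r[x] :: r.drop (x + 1) := List.drop_eq_getElem_cons h
    have hd : rkNd r[x] = true := by
      simp [rkNd, rkDg]
      exact hc
    rw [rkFindS, dif_pos h, if_pos hc]
    rw [ih, hdrop, List.takeWhile_cons, if_pos hd, List.length_cons]
    omega
  · intro x h hc
    have hdrop : r.drop x = r[x] :: r.drop (x + 1) := List.drop_eq_getElem_cons h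
    have hd : rkNd r[x] = false := by
      push_neg at hc
      simp [rkNd, rkDg, hc.1, hc.2]
    rw [rkFindS, dif_pos h, if_neg hc, hdrop, List.takeWhile_cons]
    simp [hd]
  · intro x h
    have hnil : r.drop x = [] := List.drop_eq_nil_of_le (by omega)
    rw [rkFindS, dif_neg h]
    simp [hnil]

lemma rkFindE_spec (r : List Char) (e : Nat) :
    rkFindE r e = e + ((r.drop e).takeWhile rkDg).length := by
  refine rkFindE.induct r (fun e => rkFindE r e = e + ((r.drop e).takeWhile rkDg).length)
    ?_ ?_ ?_ e
  · intro x h hc ih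
    have hdrop : r.drop x = r[x] :: r.drop (x + 1) := List.drop_eq_getElem_cons h
    have hd : rkDg r[x] = true := by simp [rkDg, hc]
    rw [rkFindE, dif_pos h, if_pos hc]
    rw [ih, hdrop, List.takeWhile_cons, if_pos hd, List.length_cons]
    omega
  · intro x h hc
    have hdrop : r.drop x = r[x] :: r.drop (x + 1) := List.drop_eq_getElem_cons h
    have hd : rkDg r[x] = false := by simp [rkDg, hc]
    rw [rkFindE, dif_pos h, if_neg hc, hdrop, List.takeWhile_cons]
    simp [hd]
  · intro x h
    have hnil : r.drop x = [] := List.drop_eq_nil_of_le (by omega)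
    rw [rkFindE, dif_neg h]
    simp [hnil]

lemma rkTake_len {α : Type} (l : List α) (p : α → Bool) :
    l.take ((l.takeWhile p).length) = l.takeWhile p := by
  induction l with
  | nil => simp
  | cons c t ih => by_cases h : p c <;> simp [List.takeWhile_cons, h, ih]

lemma rkDrop_len {α : Type} (l : List α) (p : α → Bool) :
    l.drop ((l.takeWhile p).length) = l.dropWhile p := by
  induction l with
  | nil => simp
  | cons c t ih => by_cases h : p c <;> simp [List.takeWhile_cons, List.dropWhile_cons, h, ih]

lemma route_key_eq (rt : String × String) : route_key rt = route_key_alt rt := by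
  simp only [route_key, route_key_alt]
  generalize rt.2.toList = l
  have hs : rkFindS l 0 = (l.takeWhile rkNd).length := by
    rw [rkFindS_spec]; simp
  have htake : l.take (rkFindS l 0) = l.takeWhile rkNd := hs ▸ rkTake_len l rkNd
  have hdrop : l.drop (rkFindS l 0) = l.dropWhile rkNd := hs ▸ rkDrop_len l rkNd
  have he : rkFindE l (rkFindS l 0)
      = rkFindS l 0 + ((l.dropWhile rkNd).takeWhile rkDg).length := by
    rw [rkFindE_spec, hdrop]
  rw [rkFold0]
  by_cases hre : l.dropWhile rkNd = []
  · -- no digit in the string: A has s = e = len(r); B never leaves state 0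
    have hfull : l.takeWhile rkNd = l := by
      have h1 := List.takeWhile_append_dropWhile (p := rkNd) (l := l)
      rw [hre, List.append_nil] at h1
      exact h1
    have he0 : rkFindE l (rkFindS l 0) = rkFindS l 0 := by rw [he, hre]; simp
    have hd2 : l.drop (rkFindE l (rkFindS l 0)) = [] := by rw [he0, hdrop, hre]
    simp [hre, he0, htake, hfull, hdrop]
  · -- a digit run exists: A's slice r[s:e] is exactly B's accumulated digit list
    rw [if_neg hre, rkFold1]
    have hslice : (l.drop (rkFindS l 0)).take (rkFindE l (rkFindS l 0) - rkFindS l 0)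
        = (l.dropWhile rkNd).takeWhile rkDg := by
      rw [he, Nat.add_sub_cancel_left, hdrop]
      exact rkTake_len _ _
    have htail : l.drop (rkFindE l (rkFindS l 0)) = (l.dropWhile rkNd).dropWhile rkDg := by
      rw [he, ← List.drop_drop, hdrop]
      exact rkDrop_len _ _
    have hcond : rkFindS l 0 ≠ rkFindE l (rkFindS l 0)
        ↔ (l.dropWhile rkNd).takeWhile rkDg ≠ [] := by
      rw [he]
      constructor
      · intro h h2; apply h; rw [h2]; simp
      · intro h h2
        apply h
        have hz : ((l.dropWhile rkNd).takeWhile rkDg).length = 0 := by omega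
        exact List.eq_nil_of_length_eq_zero hz
    rw [htake, hslice, htail]
    simp only [List.nil_append]
    by_cases hn : (l.dropWhile rkNd).takeWhile rkDg = []
    · simp [hn, hcond.not_left.mpr (by simp [hn])]
    · simp [hn, hcond.mpr hn]

-- ===== VERDICT =====
theorem route_key_spec : Claim_equal_route_key := by
  intro rt _
  unfold Spec_route_key
  exact route_key_eq rt
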